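-- pv_equiv track=rewrite | github.com/pawarbi/fabric-skills-toolkit | tools/notebook.py | fabric_source_to_cells
-- ===== SOURCE A (Python) =====
-- def fabric_source_to_cells(content: str) -> list:
--     """Parse Fabric notebook-content.py into a list of cell dicts."""
--     lines = content.split("\n")
--     cells = []
--     i = 0
--
--     while i < len(lines):
--         line = lines[i].rstrip()
--
--         if line == "# MARKDOWN ********************":
--             i += 1
--             # Skip blank line after marker
--             if i < len(lines) and lines[i].strip() == "":
--                 i += 1
--             md_lines = []
--             while i < len(lines):
--                 cur = lines[i].rstrip()
--                 if cur.startswith("# CELL ********************") or cur.startswith("# MARKDOWN ********************"):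
--                     break
--                 if cur.startswith("# META ") or cur == "# METADATA ********************":
--                     break
--                 # Strip the "# " prefix
--                 if cur.startswith("# "):
--                     md_lines.append(cur[2:])
--                 elif cur == "#":
--                     md_lines.append("")
--                 else:
--                     md_lines.append(cur)
--                 i += 1
--             # Remove trailing empty lines
--             while md_lines and md_lines[-1] == "":
--                 md_lines.pop()
--             cells.append({"type": "markdown", "content": "\n".join(md_lines)})
--
--         elif line == "# CELL ********************":
--             i += 1
--             if i < len(lines) and lines[i].strip() == "":
--                 i += 1
--             code_lines = []
--             while i < len(lines):
--                 cur = lines[i].rstrip()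
--                 if cur == "# METADATA ********************":
--                     # Skip metadata block
--                     i += 1
--                     while i < len(lines):
--                         if lines[i].rstrip().startswith("# META "):
--                             i += 1
--                         elif lines[i].strip() == "":
--                             i += 1
--                         else:
--                             break
--                     break
--                 if cur.startswith("# CELL ********************") or cur.startswith("# MARKDOWN ********************"):
--                     break
--                 code_lines.append(cur)
--                 i += 1
--             # Remove trailing empty lines
--             while code_lines and code_lines[-1] == "":
--                 code_lines.pop()
--             cells.append({"type": "code", "content": "\n".join(code_lines)})
--         else:
--             i += 1
--
--     return cells
-- ===== SOURCE B (Python) =====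
-- MD_MARK = "# MARKDOWN ********************"
-- CELL_MARK = "# CELL ********************"
-- META_MARK = "# METADATA ********************"
--
--
-- def fabric_source_to_cells(content: str) -> list:
--     """Parse Fabric notebook-content.py into a list of cell dicts.
--
--     Two phases: group the (right-stripped) lines into marker-led segments,
--     then render each segment independently."""
--     lines = [ln.rstrip() for ln in content.split("\n")]
--     # Phase 1: segment the lines at marker lines; text before the first marker is dropped.
--     segs = []
--     for ln in lines:
--         if ln == MD_MARK or ln == CELL_MARK:
--             segs.append([ln])
--         elif segs:
--             segs[-1].append(ln)
--     # Phase 2: render each segment on its own.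
--     cells = []
--     for seg in segs:
--         head, rest = seg[0], seg[1:]
--         if rest and rest[0] == "":
--             rest = rest[1:]
--         body = []
--         if head == MD_MARK:
--             for cur in rest:
--                 if (cur.startswith(CELL_MARK) or cur.startswith(MD_MARK)
--                         or cur.startswith("# META ") or cur == META_MARK):
--                     break
--                 if cur.startswith("# "):
--                     body.append(cur[2:])
--                 elif cur == "#":
--                     body.append("")
--                 else:
--                     body.append(cur)
--             typ = "markdown"
--         else:
--             for cur in rest:
--                 if cur == META_MARK or cur.startswith(CELL_MARK) or cur.startswith(MD_MARK):
--                     break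
--                 body.append(cur)
--             typ = "code"
--         while body and body[-1] == "":
--             body.pop()
--         cells.append({"type": typ, "content": "\n".join(body)})
--     return cells
-- ===== Notes on version B (the rewrite author's own statement) =====
-- stated objective: alternative
-- what changed: B replaces A's single index-driven scan (shared cursor, nested break/skip loops and an explicit metadata-skip loop) by two independent phases: right-strip all lines once and group them into marker-led segments, then render each segment on its own; the metadata-skip loop disappears because skipped lines never reach a cell body.
import Mathlib
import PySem

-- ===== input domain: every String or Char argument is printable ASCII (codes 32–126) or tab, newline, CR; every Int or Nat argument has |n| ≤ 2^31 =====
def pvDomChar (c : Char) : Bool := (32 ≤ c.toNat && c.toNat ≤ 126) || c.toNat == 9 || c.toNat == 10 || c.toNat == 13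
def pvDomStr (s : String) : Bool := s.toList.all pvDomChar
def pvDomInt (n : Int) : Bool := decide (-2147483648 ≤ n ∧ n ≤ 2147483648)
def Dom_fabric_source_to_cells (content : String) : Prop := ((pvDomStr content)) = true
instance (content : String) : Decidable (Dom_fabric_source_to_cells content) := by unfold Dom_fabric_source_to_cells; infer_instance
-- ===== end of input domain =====

-- B re-implements A's index-driven scan as two independent phases (segment the
-- right-stripped lines at marker lines, then render each segment on its own);
-- objective: alternative decomposition, same O(n) cost.

def pvMD : String := "# MARKDOWN ********************"
def pvCELL : String := "# CELL ********************"
def pvMETA : String := "# METADATA ********************"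

-- ===== PORT A =====
-- inner `while` of the markdown branch: returns (md_lines, remaining lines)
def pvMdCollect : List String → List String × List String
  | [] => ([], [])
  | l :: ls =>
    let cur := PySem.Str.rstrip l
    if PySem.Str.startswith cur pvCELL || PySem.Str.startswith cur pvMD then ([], l :: ls)
    else if PySem.Str.startswith cur "# META " || cur == pvMETA then ([], l :: ls)
    else
      let r := pvMdCollect ls
      ((if PySem.Str.startswith cur "# " then PySem.Str.slice cur (some 2) none
        else if cur == "#" then "" else cur) :: r.1, r.2)

-- the metadata-skip `while` of the code branch
def pvMetaSkip : List String → List String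
  | [] => []
  | l :: ls =>
    if PySem.Str.startswith (PySem.Str.rstrip l) "# META " then pvMetaSkip ls
    else if PySem.Str.strip l == "" then pvMetaSkip ls
    else l :: ls

-- inner `while` of the code branch: returns (code_lines, remaining lines)
def pvCodeCollect : List String → List String × List String
  | [] => ([], [])
  | l :: ls =>
    let cur := PySem.Str.rstrip l
    if cur == pvMETA then ([], pvMetaSkip ls)
    else if PySem.Str.startswith cur pvCELL || PySem.Str.startswith cur pvMD then ([], l :: ls)
    else
      let r := pvCodeCollect ls
      (cur :: r.1, r.2)

-- `while xs and xs[-1] == "": xs.pop()`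
def pvPopTrailing (xs : List String) : List String :=
  if xs ≠ [] ∧ xs.getLast? = some "" then pvPopTrailing xs.dropLast else xs
termination_by xs.length
decreasing_by
  rename_i h
  have : xs.length ≠ 0 := by simpa using List.length_pos_of_ne_nil h.1 |>.ne'
  simp [List.length_dropLast]; omega

-- `if i < len(lines) and lines[i].strip() == "": i += 1`
def pvSkipBlank : List String → List String
  | [] => []
  | l :: ls => if PySem.Str.strip l == "" then ls else l :: ls

theorem pvMetaSkip_length_le : ∀ s : List String, (pvMetaSkip s).length ≤ s.length := by
  intro s
  induction s with
  | nil => simp [pvMetaSkip]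
  | cons l ls ih => simp only [pvMetaSkip]; split_ifs <;> simp <;> omega

theorem pvMdCollect_snd_length_le : ∀ s : List String, (pvMdCollect s).2.length ≤ s.length := by
  intro s
  induction s with
  | nil => simp [pvMdCollect]
  | cons l ls ih => simp only [pvMdCollect]; split_ifs <;> simp <;> omega

theorem pvCodeCollect_snd_length_le : ∀ s : List String, (pvCodeCollect s).2.length ≤ s.length := by
  intro s
  induction s with
  | nil => simp [pvCodeCollect]
  | cons l ls ih =>
    simp only [pvCodeCollect]; split_ifs
    · have := pvMetaSkip_length_le ls; simp; omega
    · simp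
    · simp; omega

theorem pvSkipBlank_length_le : ∀ s : List String, (pvSkipBlank s).length ≤ s.length := by
  intro s; cases s with
  | nil => simp [pvSkipBlank]
  | cons l ls => simp only [pvSkipBlank]; split_ifs <;> simp

-- the outer `while i < len(lines)` loop of A
def pvLoopA : List String → List (List (String × String))
  | [] => []
  | l :: ls =>
    let line := PySem.Str.rstrip l
    if line == pvMD then
      let r := pvMdCollect (pvSkipBlank ls)
      [("type", "markdown"), ("content", PySem.Str.join "\n" (pvPopTrailing r.1))] :: pvLoopA r.2
    else if line == pvCELL then
      let r := pvCodeCollect (pvSkipBlank ls)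
      [("type", "code"), ("content", PySem.Str.join "\n" (pvPopTrailing r.1))] :: pvLoopA r.2
    else pvLoopA ls
termination_by L => L.length
decreasing_by
  · have h1 := pvMdCollect_snd_length_le (pvSkipBlank ls)
    have h2 := pvSkipBlank_length_le ls
    simp; omega
  · have h1 := pvCodeCollect_snd_length_le (pvSkipBlank ls)
    have h2 := pvSkipBlank_length_le ls
    simp; omega
  · simp

def fabric_source_to_cells (content : String) : List (List (String × String)) :=
  pvLoopA ((PySem.Str.split? content "\n").getD [])

-- ===== PORT B =====
-- phase 1 loop body: start a new segment at a marker line, else append to the last one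
def pvGroupStep (segs : List (List String)) (ln : String) : List (List String) :=
  if ln == pvMD || ln == pvCELL then segs ++ [[ln]]
  else if segs ≠ [] then segs.dropLast ++ [(segs.getLast?.getD []) ++ [ln]]
  else segs

-- markdown body `for` loop (break conditions of Source B)
def pvMdBody : List String → List String
  | [] => []
  | cur :: rest =>
    if PySem.Str.startswith cur pvCELL || PySem.Str.startswith cur pvMD ||
       PySem.Str.startswith cur "# META " || cur == pvMETA then []
    else (if PySem.Str.startswith cur "# " then PySem.Str.slice cur (some 2) none
          else if cur == "#" then "" else cur) :: pvMdBody rest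

-- code body `for` loop
def pvCodeBody : List String → List String
  | [] => []
  | cur :: rest =>
    if cur == pvMETA || PySem.Str.startswith cur pvCELL || PySem.Str.startswith cur pvMD then []
    else cur :: pvCodeBody rest

-- `while body and body[-1] == "": body.pop()`
def pvDropTrailing (xs : List String) : List String :=
  if xs ≠ [] ∧ xs.getLast? = some "" then pvDropTrailing xs.dropLast else xs
termination_by xs.length
decreasing_by
  rename_i h
  have : xs.length ≠ 0 := by simpa using List.length_pos_of_ne_nil h.1 |>.ne'
  simp [List.length_dropLast]; omega

-- phase 2: render one segment
def pvRenderSeg (seg : List String) : List (String × String) :=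
  let head := seg.headD ""
  let rest0 := seg.tail
  let rest := if rest0 ≠ [] ∧ rest0.headD "" == "" then rest0.tail else rest0
  if head == pvMD then
    [("type", "markdown"), ("content", PySem.Str.join "\n" (pvDropTrailing (pvMdBody rest)))]
  else
    [("type", "code"), ("content", PySem.Str.join "\n" (pvDropTrailing (pvCodeBody rest)))]

def fabric_source_to_cells_alt (content : String) : List (List (String × String)) :=
  let lines := ((PySem.Str.split? content "\n").getD []).map PySem.Str.rstrip
  (lines.foldl pvGroupStep []).map pvRenderSeg

-- ===== PRECONDITION & SPEC =====
def Spec_fabric_source_to_cells (content : String) (out : List (List (String × String))) : Prop := out = fabric_source_to_cells_alt content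
instance (content : String) (out : List (List (String × String))) : Decidable (Spec_fabric_source_to_cells content out) := by unfold Spec_fabric_source_to_cells; infer_instance

-- ===== CLAIM (what is proved, stated in full; the proofs are below) =====
def Claim_equal_fabric_source_to_cells : Prop := ∀ (content : String), Dom_fabric_source_to_cells content → Spec_fabric_source_to_cells content (fabric_source_to_cells content)

-- ===== LEMMAS AND PROOFS =====

-- a line (already right-stripped) that starts a new cell
def pvIsMarker (c : String) : Bool := c == pvMD || c == pvCELL

def pvNM (c : String) : Bool := !pvIsMarker c

-- recursive description of phase 1's grouping
def pvRSegs : List String → List (List String)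
  | [] => []
  | l :: ls =>
    if pvIsMarker l then
      (l :: ls.takeWhile pvNM) :: pvRSegs (ls.dropWhile pvNM)
    else pvRSegs ls
termination_by L => L.length
decreasing_by
  · have := List.length_dropWhile_le pvNM ls; simp; omega
  · simp

-- ---- string facts ----

theorem pv_blank_iff (l : String) : PySem.Str.strip l = "" ↔ PySem.Str.rstrip l = "" := by
  have h1 : ∀ s : String, s = "" ↔ s.toList = [] :=
    fun s => ⟨fun h => h ▸ rfl, fun h => String.toList_eq_nil_iff.mp h⟩
  rw [h1, h1, PySem.Str.toList_strip, PySem.Str.toList_rstrip]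
  unfold PySem.Chars.strip PySem.Chars.lstrip PySem.Chars.rstrip
  simp [List.dropWhile_eq_nil_iff]
  constructor
  · intro h x hx
    rcases List.mem_append.mp
        ((List.takeWhile_append_dropWhile (p := PySem.Chars.isspace) (l := l.toList)) ▸ hx)
      with h' | h'
    · exact List.mem_takeWhile_imp h'
    · exact h x h'
  · intro h x hx
    exact h x ((List.dropWhile_sublist _).subset hx)

theorem pv_marker_cases {c : String} (h : pvIsMarker c = true) : c = pvMD ∨ c = pvCELL := by
  rcases Bool.or_eq_true_iff.mp h with h' | h' <;> [left; right] <;> exact (beq_iff_eq.mp h')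

theorem pv_marker_break {c : String} (h : pvIsMarker c = true) :
    (PySem.Str.startswith c pvCELL || PySem.Str.startswith c pvMD) = true := by
  rcases pv_marker_cases h with rfl | rfl <;> decide

theorem pv_marker_ne_meta {c : String} (h : pvIsMarker c = true) : (c == pvMETA) = false := by
  rcases pv_marker_cases h with rfl | rfl <;> decide

theorem pv_meta_not_marker {c : String} (h : PySem.Str.startswith c "# META " = true) :
    pvIsMarker c = false := by
  rcases hM : pvIsMarker c with _ | _
  · rfl
  · rcases pv_marker_cases hM with rfl | rfl <;> exact absurd h (by decide)

theorem pv_blank_not_marker : pvIsMarker "" = false := by decide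

theorem pv_nm_empty : pvNM "" = true := by decide

theorem pvRSegs_nil : pvRSegs [] = [] := by rw [pvRSegs.eq_def]

theorem pvRSegs_cons_marker {l : String} {ls : List String} (h : pvIsMarker l = true) :
    pvRSegs (l :: ls) = (l :: ls.takeWhile pvNM) :: pvRSegs (ls.dropWhile pvNM) := by
  rw [pvRSegs.eq_def]; simp [h]

theorem pvRSegs_cons_nm {l : String} {ls : List String} (h : pvIsMarker l = false) :
    pvRSegs (l :: ls) = pvRSegs ls := by
  rw [pvRSegs.eq_def]; simp [h]

-- ---- phase 1 = pvRSegs ----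

theorem pvGroup_aux (ls : List String) (segs0 : List (List String)) (cur : List String) :
    ls.foldl pvGroupStep (segs0 ++ [cur]) =
      segs0 ++ (cur ++ ls.takeWhile pvNM) :: pvRSegs (ls.dropWhile pvNM) := by
  induction ls generalizing segs0 cur with
  | nil => simp [pvRSegs_nil]
  | cons l ls ih =>
    rcases hm : pvIsMarker l with _ | _
    · have hstep : pvGroupStep (segs0 ++ [cur]) l = segs0 ++ [cur ++ [l]] := by
        unfold pvGroupStep
        have : (l == pvMD || l == pvCELL) = false := by
          simpa [pvIsMarker] using hm
        simp [this]
      rw [List.foldl_cons, hstep, ih]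
      simp [pvNM, hm]
    · have hstep : pvGroupStep (segs0 ++ [cur]) l = (segs0 ++ [cur]) ++ [[l]] := by
        unfold pvGroupStep
        have : (l == pvMD || l == pvCELL) = true := by
          simpa [pvIsMarker] using hm
        simp [this]
      rw [List.foldl_cons, hstep]
      rw [ih (segs0 ++ [cur]) [l]]
      simp [pvNM, hm, pvRSegs_cons_marker hm]

theorem pvGroup_eq (ls : List String) : ls.foldl pvGroupStep [] = pvRSegs ls := by
  induction ls with
  | nil => simp [pvRSegs_nil]
  | cons l ls ih =>
    rcases hm : pvIsMarker l with _ | _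
    · have hstep : pvGroupStep [] l = [] := by
        unfold pvGroupStep
        have : (l == pvMD || l == pvCELL) = false := by
          simpa [pvIsMarker] using hm
        simp [this]
      rw [List.foldl_cons, hstep, ih, pvRSegs_cons_nm hm]
    · have hstep : pvGroupStep [] l = [] ++ [[l]] := by
        unfold pvGroupStep
        have : (l == pvMD || l == pvCELL) = true := by
          simpa [pvIsMarker] using hm
        simp [this]
      rw [List.foldl_cons, hstep, pvGroup_aux, pvRSegs_cons_marker hm]
      simp

-- ---- the remainder returned by A's inner loops only drops non-marker lines ----

def pvTail (s r : List String) : Prop :=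
  ∃ k, r = s.drop k ∧ ∀ x ∈ s.take k, pvIsMarker (PySem.Str.rstrip x) = false

theorem pvTail_refl (s : List String) : pvTail s s := ⟨0, by simp⟩

theorem pvTail_cons {s r : List String} {x : String}
    (hx : pvIsMarker (PySem.Str.rstrip x) = false) (h : pvTail s r) : pvTail (x :: s) r := by
  obtain ⟨k, hr, hk⟩ := h
  refine ⟨k + 1, by simpa using hr, ?_⟩
  intro y hy
  rw [List.take_succ_cons, List.mem_cons] at hy
  rcases hy with rfl | hy
  · exact hx
  · exact hk y hy

theorem pvTail_trans {s r t : List String} (h1 : pvTail s r) (h2 : pvTail r t) : pvTail s t := by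
  obtain ⟨k1, hr, hk1⟩ := h1
  obtain ⟨k2, ht, hk2⟩ := h2
  refine ⟨k1 + k2, by simp [ht, hr, List.drop_drop], ?_⟩
  intro x hx
  rw [List.take_add, List.mem_append] at hx
  exact hx.elim (hk1 x) (fun h => hk2 x (by simpa [hr] using h))

theorem pv_notbreak_not_marker {c : String}
    (h : ¬ (PySem.Str.startswith c pvCELL || PySem.Str.startswith c pvMD) = true) :
    pvIsMarker c = false := by
  rcases hM : pvIsMarker c with _ | _
  · rfl
  · exact absurd (pv_marker_break hM) h

theorem pv_blank_str_not_marker {l : String} (h : (PySem.Str.strip l == "") = true) :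
    pvIsMarker (PySem.Str.rstrip l) = false := by
  rw [(pv_blank_iff l).mp (beq_iff_eq.mp h)]
  exact pv_blank_not_marker

theorem pvTail_skipBlank (s : List String) : pvTail s (pvSkipBlank s) := by
  cases s with
  | nil => exact pvTail_refl []
  | cons l ls =>
    simp only [pvSkipBlank]
    split_ifs with h
    · exact pvTail_cons (pv_blank_str_not_marker (by simpa using h)) (pvTail_refl ls)
    · exact pvTail_refl _

theorem pvTail_mdCollect (s : List String) : pvTail s (pvMdCollect s).2 := by
  induction s with
  | nil => exact pvTail_refl _
  | cons l ls ih =>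
    simp only [pvMdCollect]
    split_ifs with h1 h2
    · exact pvTail_refl _
    · exact pvTail_refl _
    all_goals exact pvTail_cons (pv_notbreak_not_marker (by simpa using h1)) ih

theorem pvTail_metaSkip (s : List String) : pvTail s (pvMetaSkip s) := by
  induction s with
  | nil => exact pvTail_refl _
  | cons l ls ih =>
    simp only [pvMetaSkip]
    split_ifs with h1 h2
    · exact pvTail_cons (pv_meta_not_marker (by simpa using h1)) ih
    · exact pvTail_cons (pv_blank_str_not_marker (by simpa using h2)) ih
    · exact pvTail_refl _

theorem pvTail_codeCollect (s : List String) : pvTail s (pvCodeCollect s).2 := by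
  induction s with
  | nil => exact pvTail_refl _
  | cons l ls ih =>
    simp only [pvCodeCollect]
    split_ifs with h1 h2
    · refine pvTail_cons ?_ (pvTail_metaSkip ls)
      rw [beq_iff_eq.mp (by simpa using h1 : (PySem.Str.rstrip l == pvMETA) = true)]
      decide
    · exact pvTail_refl _
    · exact pvTail_cons (pv_notbreak_not_marker (by simpa using h2)) ih

theorem pvTail_dropWhile {s r : List String} (h : pvTail s r) :
    (r.map PySem.Str.rstrip).dropWhile pvNM = (s.map PySem.Str.rstrip).dropWhile pvNM := by
  obtain ⟨k, rfl, hk⟩ := h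
  induction k generalizing s with
  | zero => simp
  | succ k ih =>
    cases s with
    | nil => simp
    | cons x xs =>
      have hx : pvIsMarker (PySem.Str.rstrip x) = false := hk x (by simp [List.take_succ_cons])
      have hrest : ∀ y ∈ xs.take k, pvIsMarker (PySem.Str.rstrip y) = false :=
        fun y hy => hk y (by simp [List.take_succ_cons, hy])
      simpa [List.dropWhile_cons, pvNM, hx] using ih hrest

theorem pvRSegs_dropWhile (s : List String) : pvRSegs (s.dropWhile pvNM) = pvRSegs s := by
  induction s with
  | nil => simp
  | cons l ls ih =>
    rcases hm : pvIsMarker l with _ | _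
    · rw [List.dropWhile_cons_of_pos (by simp [pvNM, hm]), ih, pvRSegs_cons_nm hm]
    · rw [List.dropWhile_cons_of_neg (by simp [pvNM, hm])]

-- ---- A's inner loops produce exactly B's per-segment bodies ----

theorem pvBodyMd_eq (s : List String) :
    (pvMdCollect s).1 = pvMdBody ((s.map PySem.Str.rstrip).takeWhile pvNM) := by
  induction s with
  | nil => rfl
  | cons l ls ih =>
    rcases hM : pvIsMarker (PySem.Str.rstrip l) with _ | _
    · rw [List.map_cons, List.takeWhile_cons_of_pos (by simp [pvNM, hM])]
      cases ha : PySem.Str.startswith (PySem.Str.rstrip l) pvCELL <;>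
        cases hb : PySem.Str.startswith (PySem.Str.rstrip l) pvMD <;>
          cases hc : PySem.Str.startswith (PySem.Str.rstrip l) "# META " <;>
            cases hd : (PySem.Str.rstrip l == pvMETA) <;>
              (simp only [pvMdCollect, pvMdBody, ha, hb, hc, hd]; simp [ih])
    · rw [List.map_cons, List.takeWhile_cons_of_neg (by simp [pvNM, hM])]
      simp only [pvMdCollect, pvMdBody, pv_marker_break hM]
      simp

theorem pvBodyCode_eq (s : List String) :
    (pvCodeCollect s).1 = pvCodeBody ((s.map PySem.Str.rstrip).takeWhile pvNM) := by
  induction s with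
  | nil => rfl
  | cons l ls ih =>
    rcases hM : pvIsMarker (PySem.Str.rstrip l) with _ | _
    · rw [List.map_cons, List.takeWhile_cons_of_pos (by simp [pvNM, hM])]
      cases ha : PySem.Str.startswith (PySem.Str.rstrip l) pvCELL <;>
        cases hb : PySem.Str.startswith (PySem.Str.rstrip l) pvMD <;>
          cases hd : (PySem.Str.rstrip l == pvMETA) <;>
            (simp only [pvCodeCollect, pvCodeBody, ha, hb, hd]; simp [ih])
    · rw [List.map_cons, List.takeWhile_cons_of_neg (by simp [pvNM, hM])]
      simp only [pvCodeCollect, pvCodeBody, pv_marker_break hM, pv_marker_ne_meta hM]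
      simp

-- A skips one blank line after a marker; B drops a leading "" from the segment body
theorem pvAdjust_takeWhile (ls : List String) :
    (if (ls.map PySem.Str.rstrip).takeWhile pvNM ≠ [] ∧
        ((ls.map PySem.Str.rstrip).takeWhile pvNM).headD "" == "" then
      ((ls.map PySem.Str.rstrip).takeWhile pvNM).tail
     else (ls.map PySem.Str.rstrip).takeWhile pvNM) =
    ((pvSkipBlank ls).map PySem.Str.rstrip).takeWhile pvNM := by
  cases ls with
  | nil => simp [pvSkipBlank]
  | cons x xs =>
    cases hb : (PySem.Str.strip x == "") with
    | false =>
      have hb' : ¬ PySem.Str.strip x = "" := by simpa using hb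
      have hx : ¬ PySem.Str.rstrip x = "" := fun h => hb' ((pv_blank_iff x).mpr h)
      rcases hnm : pvNM (PySem.Str.rstrip x) with _ | _
      · simp [pvSkipBlank, hb, hnm]
      · simp [pvSkipBlank, hb, hnm, hx]
    | true =>
      have hx : PySem.Str.rstrip x = "" := (pv_blank_iff x).mp (by simpa using hb)
      simp [pvSkipBlank, hb, hx, pv_nm_empty]

theorem pvPop_eq_drop (xs : List String) : pvPopTrailing xs = pvDropTrailing xs := by
  fun_induction pvPopTrailing with
  | case1 xs h ih =>
    rw [ih]
    conv_rhs => rw [pvDropTrailing.eq_def]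
    rw [if_pos h]
  | case2 xs h =>
    conv_rhs => rw [pvDropTrailing.eq_def]
    rw [if_neg h]

-- ---- main induction: A's loop = render the recursive segmentation ----

theorem pvLoopA_eq (L : List String) :
    pvLoopA L = (pvRSegs (L.map PySem.Str.rstrip)).map pvRenderSeg := by
  fun_induction pvLoopA with
  | case1 => simp [pvRSegs_nil]
  | case2 l ls line hcond r ih =>
    have hline : PySem.Str.rstrip l = pvMD := beq_iff_eq.mp hcond
    have hMk : pvIsMarker (PySem.Str.rstrip l) = true := by simp [pvIsMarker, hline]
    rw [List.map_cons, pvRSegs_cons_marker hMk, List.map_cons]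
    congr 1
    · simp only [pvRenderSeg, List.headD_cons, List.tail_cons, hline]
      rw [if_pos (by decide : (pvMD == pvMD) = true), pvAdjust_takeWhile, ← pvBodyMd_eq,
        ← pvPop_eq_drop]
    · rw [ih, ← pvRSegs_dropWhile (List.map PySem.Str.rstrip r.2),
        pvTail_dropWhile (pvTail_trans (pvTail_skipBlank ls) (pvTail_mdCollect (pvSkipBlank ls))),
        pvRSegs_dropWhile]
  | case3 l ls line hcond1 hcond r ih =>
    have hline : PySem.Str.rstrip l = pvCELL := beq_iff_eq.mp hcond
    have hMk : pvIsMarker (PySem.Str.rstrip l) = true := by simp [pvIsMarker, hline]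
    rw [List.map_cons, pvRSegs_cons_marker hMk, List.map_cons]
    congr 1
    · simp only [pvRenderSeg, List.headD_cons, List.tail_cons, hline]
      rw [if_neg (by decide : ¬ (pvCELL == pvMD) = true), pvAdjust_takeWhile, ← pvBodyCode_eq,
        ← pvPop_eq_drop]
    · rw [ih, ← pvRSegs_dropWhile (List.map PySem.Str.rstrip r.2),
        pvTail_dropWhile (pvTail_trans (pvTail_skipBlank ls) (pvTail_codeCollect (pvSkipBlank ls))),
        pvRSegs_dropWhile]
  | case4 l ls line hcond1 hcond2 ih =>
    have ha : (PySem.Str.rstrip l == pvMD) = false := by simpa using hcond1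
    have hb : (PySem.Str.rstrip l == pvCELL) = false := by simpa using hcond2
    have hM : pvIsMarker (PySem.Str.rstrip l) = false := by simp [pvIsMarker, ha, hb]
    rw [List.map_cons, pvRSegs_cons_nm hM]
    exact ih

-- ===== VERDICT (by name: the statement is the Claim_ definition above) =====
theorem fabric_source_to_cells_spec : Claim_equal_fabric_source_to_cells := by
  intro content _
  unfold Spec_fabric_source_to_cells fabric_source_to_cells fabric_source_to_cells_alt
  simp only [pvGroup_eq, pvLoopA_eq]
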